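-- pv_equiv track=rewrite | github.com/christopherruano/SudokuOCR | oneshot.py | _find_digit_fix
-- ===== SOURCE A (Python) =====
-- _DIGIT_CONFUSIONS = [
--     (3, 8), (8, 3),  # 3↔8 (diff=5)
--     (5, 6), (6, 5),  # 5↔6 (diff=1)
--     (0, 9), (9, 0),  # 0↔9 (diff=9)
--     (0, 8), (8, 0),  # 0↔8 (diff=8)
--     (1, 7), (7, 1),  # 1↔7 (diff=6)
--     (6, 8), (8, 6),  # 6↔8 (diff=2)
--     (3, 5), (5, 3),  # 3↔5 (diff=2)
--     (0, 6), (6, 0),  # 0↔6 (diff=6)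
--     (6, 9), (9, 6),  # 6↔9 (diff=3)
--     (4, 9), (9, 4),  # 4↔9 (diff=5)
--     (3, 9), (9, 3),  # 3↔9 (diff=6)
--     (1, 4), (4, 1),  # 1↔4 (diff=3)
--     (2, 7), (7, 2),  # 2↔7 (diff=5)
--     (5, 9), (9, 5),  # 5↔9 (diff=4)
--     (0, 5), (5, 0),  # 0↔5 (diff=5)
--     (3, 6), (6, 3),  # 3↔6 (diff=3, curved digits)
--     (4, 5), (5, 4),  # 4↔5 (diff=1)
--     (1, 0), (0, 1),  # 1↔0 (diff=1, thin stroke)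
--     (5, 8), (8, 5),  # 5↔8 (diff=3, curved digits)
--     (2, 5), (5, 2),  # 2↔5 (diff=3, curved bottom)
--     (0, 3), (3, 0),  # 0↔3 (diff=3, closed vs open curve)
--     (4, 7), (7, 4),  # 4↔7 (diff=3, angular strokes)
--     (8, 9), (9, 8),  # 8↔9 (diff=1, closed loops)
--     (2, 3), (3, 2),  # 2↔3 (diff=1, curved digits)
--     (6, 7), (7, 6),  # 6↔7 (diff=1)
-- ]
--
-- def _find_digit_fix(value, target_change):
--     """Find a single-digit replacement that changes value by exactly target_change.
--
--     Checks all OCR digit confusion patterns at every digit position.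
--
--     Returns (new_value, position, old_digit, new_digit) or None.
--     """
--     if value is None or target_change == 0:
--         return None
--
--     digits = list(str(abs(value)))
--     n_digits = len(digits)
--
--     for pos in range(n_digits):
--         place_value = 10 ** (n_digits - 1 - pos)
--         current_digit = int(digits[pos])
--
--         for wrong_d, correct_d in _DIGIT_CONFUSIONS:
--             if current_digit != wrong_d:
--                 continue
--             change = (correct_d - wrong_d) * place_value
--             if change == target_change:
--                 new_digits = digits.copy()
--                 new_digits[pos] = str(correct_d)
--                 new_value = int("".join(new_digits))
--                 if value < 0:
--                     new_value = -new_value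
--                 return (new_value, n_digits - 1 - pos, wrong_d, correct_d)
--
--     return None
-- ===== SOURCE B (Python) =====
-- _DIGIT_CONFUSIONS = [
--     (3, 8), (8, 3), (5, 6), (6, 5), (0, 9), (9, 0), (0, 8), (8, 0),
--     (1, 7), (7, 1), (6, 8), (8, 6), (3, 5), (5, 3), (0, 6), (6, 0),
--     (6, 9), (9, 6), (4, 9), (9, 4), (3, 9), (9, 3), (1, 4), (4, 1),
--     (2, 7), (7, 2), (5, 9), (9, 5), (0, 5), (5, 0), (3, 6), (6, 3),
--     (4, 5), (5, 4), (1, 0), (0, 1), (5, 8), (8, 5), (2, 5), (5, 2),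
--     (0, 3), (3, 0), (4, 7), (7, 4), (8, 9), (9, 8), (2, 3), (3, 2),
--     (6, 7), (7, 6),
-- ]
--
-- _CONFUSION_SET = frozenset(_DIGIT_CONFUSIONS)
--
-- def _find_digit_fix(value, target_change):
--     """Find a single-digit replacement that changes value by exactly target_change.
--
--     No search at all: a single-digit edit at place value 10**v changes the
--     number by q * 10**v with 1 <= |q| <= 9, so factor target_change as
--     q * 10**v with q not divisible by 10. That determines the ONLY possible
--     digit position; check the confusion pair there directly.
--     """
--     if value is None or target_change == 0:
--         return None
--
--     digits = str(abs(value))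
--
--     # factor target_change = q * 10**v, 10 does not divide q
--     q, v = target_change, 0
--     while q % 10 == 0:
--         q //= 10
--         v += 1
--
--     pos = len(digits) - 1 - v
--     if pos < 0 or not -9 <= q <= 9:
--         return None
--
--     d = int(digits[pos])
--     c = d + q
--     if (d, c) not in _CONFUSION_SET:
--         return None
--
--     new_value = int(digits[:pos] + str(c) + digits[pos + 1:])
--     if value < 0:
--         new_value = -new_value
--     return (new_value, v, d, c)
-- ===== Notes on version B (the rewrite author's own statement) =====
-- stated objective: alternative
-- what changed: Eliminates both of A's loops (over digit positions and over the 50-entry confusion table): a single-digit edit changes the value by q*10^v with 1<=|q|<=9, so B factors target_change into q*10^v with 10 not dividing q, jumps directly to the unique candidate digit position, and does one set-membership test there.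
import Mathlib
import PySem

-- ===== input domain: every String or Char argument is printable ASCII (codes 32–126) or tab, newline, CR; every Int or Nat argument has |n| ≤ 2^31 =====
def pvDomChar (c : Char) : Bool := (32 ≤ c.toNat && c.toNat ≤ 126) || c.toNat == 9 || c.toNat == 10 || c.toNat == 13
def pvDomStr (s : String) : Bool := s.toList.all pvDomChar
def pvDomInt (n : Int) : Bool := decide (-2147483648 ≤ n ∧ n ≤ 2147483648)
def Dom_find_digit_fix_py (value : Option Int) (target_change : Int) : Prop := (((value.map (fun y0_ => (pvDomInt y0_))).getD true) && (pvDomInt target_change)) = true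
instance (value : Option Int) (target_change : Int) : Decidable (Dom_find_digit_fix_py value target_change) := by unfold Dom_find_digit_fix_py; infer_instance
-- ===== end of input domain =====

-- B removes both of A's loops: it factors target_change = q * 10^v (10 ∤ q), which pins
-- down the only digit position a single-digit edit could use; objective: alternative.

-- ===== PORT A =====

-- the module-level _DIGIT_CONFUSIONS table (shared by both ports: Source B restates the same literal list)
def pvConfusions : List (Int × Int) :=
  [(3, 8), (8, 3), (5, 6), (6, 5), (0, 9), (9, 0), (0, 8), (8, 0),
   (1, 7), (7, 1), (6, 8), (8, 6), (3, 5), (5, 3), (0, 6), (6, 0),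
   (6, 9), (9, 6), (4, 9), (9, 4), (3, 9), (9, 3), (1, 4), (4, 1),
   (2, 7), (7, 2), (5, 9), (9, 5), (0, 5), (5, 0), (3, 6), (6, 3),
   (4, 5), (5, 4), (1, 0), (0, 1), (5, 8), (8, 5), (2, 5), (5, 2),
   (0, 3), (3, 0), (4, 7), (7, 4), (8, 9), (9, 8), (2, 3), (3, 2),
   (6, 7), (7, 6)]

-- int(<one digit char>): exact on decimal-digit characters (the only chars of str(abs(value)))
def pvDigitVal (c : Char) : Int := (c.toNat : Int) - 48

-- str(d) as one char: exact for 0 ≤ d ≤ 9 (the only digits reaching it)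
def pvDigitChr (d : Int) : Char := Char.ofNat (48 + d.toNat)

-- int("<digits>"): exact on nonempty decimal-digit strings (all that reaches it here)
def pvStrDigitsToInt (l : List Char) : Int := l.foldl (fun a c => a * 10 + ((c.toNat : Int) - 48)) 0

-- A's inner 'for wrong_d, correct_d in _DIGIT_CONFUSIONS' loop: first pair with
-- current_digit == wrong_d and (correct_d - wrong_d) * place_value == target_change
def pvPairScan (d place tc : Int) : List (Int × Int) → Option Int
  | [] => none
  | (w, c) :: rest =>
    if d ≠ w then pvPairScan d place tc rest
    else if (c - w) * place = tc then some c
    else pvPairScan d place tc rest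

-- A's outer 'for pos in range(n_digits)' loop
def pvLoopA (v tc : Int) (digits : List Char) (pos : Nat) : Option (Int × Int × Int × Int) :=
  if h : pos < digits.length then
    let place : Int := (10 : Int) ^ (digits.length - 1 - pos)
    let d : Int := pvDigitVal digits[pos]
    match pvPairScan d place tc pvConfusions with
    | some c =>
        let nv := pvStrDigitsToInt (digits.set pos (pvDigitChr c))
        some (if v < 0 then -nv else nv, ((digits.length - 1 - pos : Nat) : Int), d, c)
    | none => pvLoopA v tc digits (pos + 1)
  else none
termination_by digits.length - pos

def find_digit_fix_py (value : Option Int) (target_change : Int) : Option (Int × Int × Int × Int) :=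
  match value with
  | none => none
  | some v =>
    if target_change = 0 then none
    else pvLoopA v target_change ((PySem.Int.toStr |v|).toList) 0

-- ===== PORT B =====

-- _CONFUSION_SET = frozenset(_DIGIT_CONFUSIONS)
def pvConfusionSet : PySem.Set (Int × Int) := PySem.Set.ofList pvConfusions

-- B's 'while q % 10 == 0: q //= 10; v += 1' factoring loop; returns (q, v).
-- The 'q ≠ 0' conjunct is a totality guard only: the loop is entered with q ≠ 0.
def pvVal10 (q : Int) : Int × Nat :=
  if h : PySem.Int.mod q 10 = 0 ∧ q ≠ 0 then
    let qv := pvVal10 (PySem.Int.floordiv q 10)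
    (qv.1, qv.2 + 1)
  else (q, 0)
termination_by q.natAbs
decreasing_by
  obtain ⟨hm, hq⟩ := h
  rw [PySem.Int.mod_eq_emod_of_pos (by norm_num)] at hm
  rw [PySem.Int.floordiv_eq_ediv_of_pos (by norm_num)]
  obtain ⟨k, rfl⟩ := Int.dvd_of_emod_eq_zero hm
  rw [Int.mul_ediv_cancel_left _ (by norm_num)]
  have hk : k.natAbs ≠ 0 := by rintro h; exact hq (by simp [Int.natAbs_eq_zero.mp h])
  rw [Int.natAbs_mul]
  have h10 : Int.natAbs 10 * k.natAbs = 10 * k.natAbs := by norm_num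
  rw [h10]
  omega

def find_digit_fix_py_alt (value : Option Int) (target_change : Int) : Option (Int × Int × Int × Int) :=
  match value with
  | none => none
  | some v =>
    if target_change = 0 then none
    else
      let digits := (PySem.Int.toStr |v|).toList
      let q : Int := (pvVal10 target_change).1
      let vl : Nat := (pvVal10 target_change).2
      if (digits.length : Int) - 1 - (vl : Int) < 0 ∨ ¬(-9 ≤ q ∧ q ≤ 9) then none
      else
        let pos : Nat := digits.length - 1 - vl
        if h : pos < digits.length then   -- totality guard for the index (always true here)
          let d : Int := pvDigitVal digits[pos]
          let c : Int := d + q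
          if (d, c) ∈ pvConfusionSet then
            -- digits[:pos] + str(c) + digits[pos+1:] (slices in range: pos < n)
            let nv := pvStrDigitsToInt (digits.take pos ++ pvDigitChr c :: digits.drop (pos + 1))
            some (if v < 0 then -nv else nv, (vl : Int), d, c)
          else none
        else none

-- ===== PRECONDITION & SPEC =====
def Spec_find_digit_fix_py (value : Option Int) (target_change : Int) (out : Option (Int × Int × Int × Int)) : Prop := out = find_digit_fix_py_alt value target_change
instance (value : Option Int) (target_change : Int) (out : Option (Int × Int × Int × Int)) : Decidable (Spec_find_digit_fix_py value target_change out) := by unfold Spec_find_digit_fix_py; infer_instance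

-- ===== CLAIM (what is proved, stated in full; the proofs are below) =====
def Claim_equal_find_digit_fix_py : Prop := ∀ (value : Option Int) (target_change : Int), Dom_find_digit_fix_py value target_change → Spec_find_digit_fix_py value target_change (find_digit_fix_py value target_change)

-- ===== LEMMAS AND PROOFS =====

-- A's scan finds exactly the pair (d, c) whose change matches target_change;
-- the matching c is unique because place ≠ 0.
theorem pvPairScan_eq_some (d place tc c : Int) (hp : place ≠ 0) (L : List (Int × Int)) :
    pvPairScan d place tc L = some c ↔ (d, c) ∈ L ∧ (c - d) * place = tc := by
  induction L with
  | nil => simp [pvPairScan]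
  | cons p rest ih =>
    obtain ⟨w, c'⟩ := p
    by_cases hdw : d = w
    · subst hdw
      by_cases heq : (c' - d) * place = tc
      · simp only [pvPairScan, ne_eq, not_true_eq_false, if_false, if_pos heq]
        constructor
        · rintro h
          cases h
          exact ⟨List.mem_cons_self, heq⟩
        · rintro ⟨_, he⟩
          have : c - d = c' - d := mul_right_cancel₀ hp (he.trans heq.symm)
          have : c = c' := by omega
          simp [this]
      · simp only [pvPairScan, ne_eq, not_true_eq_false, if_false, if_neg heq, ih,
          List.mem_cons, Prod.mk.injEq]
        constructor
        · rintro ⟨hm, he⟩; exact ⟨Or.inr hm, he⟩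
        · rintro ⟨hm, he⟩
          rcases hm with ⟨_, rfl⟩ | hm
          · exact absurd he heq
          · exact ⟨hm, he⟩
    · simp only [pvPairScan, ne_eq, if_pos hdw, ih, List.mem_cons, Prod.mk.injEq]
      constructor
      · rintro ⟨hm, he⟩; exact ⟨Or.inr hm, he⟩
      · rintro ⟨hm, he⟩
        rcases hm with ⟨rfl, _⟩ | hm
        · exact absurd rfl hdw
        · exact ⟨hm, he⟩

theorem pvPairScan_eq_none (d place tc : Int) (hp : place ≠ 0) (L : List (Int × Int))
    (h : ∀ c, ¬((d, c) ∈ L ∧ (c - d) * place = tc)) :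
    pvPairScan d place tc L = none := by
  cases hs : pvPairScan d place tc L with
  | none => rfl
  | some c => exact absurd ((pvPairScan_eq_some d place tc c hp L).mp hs) (h c)

-- every confusion pair is a pair of distinct digits at distance at most 9
theorem pvConfusions_diff : ∀ p ∈ pvConfusions, -9 ≤ p.2 - p.1 ∧ p.2 - p.1 ≤ 9 ∧ p.2 - p.1 ≠ 0 := by
  decide

-- the factoring loop really factors: q = r * 10^v with 10 ∤ r
theorem pvVal10_spec : ∀ q : Int, q ≠ 0 →
    q = (pvVal10 q).1 * 10 ^ (pvVal10 q).2 ∧ (pvVal10 q).1 % 10 ≠ 0 ∧ (pvVal10 q).1 ≠ 0 := by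
  intro q
  induction q using pvVal10.induct with
  | case1 q h ih =>
    intro _
    obtain ⟨hm, hq⟩ := h
    rw [PySem.Int.mod_eq_emod_of_pos (by norm_num)] at hm
    have hd : (10 : Int) ∣ q := Int.dvd_of_emod_eq_zero hm
    obtain ⟨k, rfl⟩ := hd
    have hk : k ≠ 0 := by rintro rfl; simp at hq
    have hfd : PySem.Int.floordiv (10 * k) 10 = k := by
      rw [PySem.Int.floordiv_eq_ediv_of_pos (by norm_num),
        Int.mul_ediv_cancel_left _ (by norm_num)]
    rw [pvVal10, dif_pos ⟨by rwa [PySem.Int.mod_eq_emod_of_pos (by norm_num)], hq⟩]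
    simp only [hfd] at ih ⊢
    obtain ⟨h1, h2, h3⟩ := ih hk
    refine ⟨?_, h2, h3⟩
    calc 10 * k = 10 * ((pvVal10 k).1 * 10 ^ (pvVal10 k).2) := by rw [← h1]
      _ = (pvVal10 k).1 * 10 ^ ((pvVal10 k).2 + 1) := by ring
  | case2 q h =>
    intro hq
    rw [pvVal10, dif_neg h]
    have hm : PySem.Int.mod q 10 ≠ 0 := fun hm => h ⟨hm, hq⟩
    rw [PySem.Int.mod_eq_emod_of_pos (by norm_num)] at hm
    exact ⟨by ring_nf, hm, hq⟩

-- uniqueness of the factorization u * 10^i with 10 ∤ u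
theorem pvFactorUnique (u q : Int) (i j : Nat) (hui : u % 10 ≠ 0) (hqj : q % 10 ≠ 0)
    (heq : u * 10 ^ i = q * 10 ^ j) : i = j ∧ u = q := by
  have hten : ∀ k : Nat, ((10 : Int) ^ k) ≠ 0 := fun k => pow_ne_zero _ (by norm_num)
  rcases lt_trichotomy i j with hij | hij | hij
  · exfalso
    have hsplit : (10 : Int) ^ j = 10 ^ (j - i) * 10 ^ i := by
      rw [← pow_add]; congr 1; omega
    have hu : u = q * 10 ^ (j - i) := by
      apply mul_right_cancel₀ (hten i)
      rw [heq, hsplit]; ring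
    have hstep : (10 : Int) ^ (j - i) = 10 ^ (j - i - 1) * 10 := by
      rw [← pow_succ]; congr 1; omega
    have : u % 10 = 0 := by
      rw [hu, hstep, ← mul_assoc]
      exact Int.mul_emod_left _ _
    exact hui this
  · subst hij
    exact ⟨rfl, mul_right_cancel₀ (hten i) heq⟩
  · exfalso
    have hsplit : (10 : Int) ^ i = 10 ^ (i - j) * 10 ^ j := by
      rw [← pow_add]; congr 1; omega
    have hq' : q = u * 10 ^ (i - j) := by
      apply mul_right_cancel₀ (hten j)
      rw [← heq, hsplit]; ring
    have hstep : (10 : Int) ^ (i - j) = 10 ^ (i - j - 1) * 10 := by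
      rw [← pow_succ]; congr 1; omega
    have : q % 10 = 0 := by
      rw [hq', hstep, ← mul_assoc]
      exact Int.mul_emod_left _ _
    exact hqj this

-- off the unique candidate exponent, A's scan cannot match
theorem pvScanOff (d q : Int) (vv k : Nat) (hq10 : q % 10 ≠ 0) (hk : k ≠ vv) :
    pvPairScan d ((10 : Int) ^ k) (q * 10 ^ vv) pvConfusions = none := by
  apply pvPairScan_eq_none _ _ _ (pow_ne_zero _ (by norm_num))
  rintro c ⟨hm, he⟩
  obtain ⟨h1, h2, h3⟩ := pvConfusions_diff _ hm
  simp only at h1 h2 h3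
  have hu10 : (c - d) % 10 ≠ 0 := by omega
  exact hk (pvFactorUnique (c - d) q k vv hu10 hq10 he).1

-- A's loop returns none when the scan is none at every remaining position
theorem pvLoopA_none (v tc : Int) (digits : List Char) :
    ∀ fuel pos, digits.length - pos ≤ fuel →
    (∀ j, pos ≤ j → (hj : j < digits.length) →
      pvPairScan (pvDigitVal digits[j]) ((10 : Int) ^ (digits.length - 1 - j)) tc pvConfusions = none) →
    pvLoopA v tc digits pos = none := by
  intro fuel
  induction fuel with
  | zero =>
    intro pos hf _
    rw [pvLoopA, dif_neg (by omega)]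
  | succ fuel ih =>
    intro pos hf h
    by_cases hp : pos < digits.length
    · rw [pvLoopA, dif_pos hp]
      simp only [h pos (Nat.le_refl _) hp]
      exact ih (pos + 1) (by omega) (fun j hj hjl => h j (by omega) hjl)
    · rw [pvLoopA, dif_neg hp]

-- A's loop passes unchanged over positions where the scan is none
theorem pvLoopA_skip (v tc : Int) (digits : List Char) (tgt : Nat) :
    ∀ fuel pos, tgt - pos ≤ fuel → pos ≤ tgt →
    (∀ j, pos ≤ j → j < tgt → (hj : j < digits.length) →
      pvPairScan (pvDigitVal digits[j]) ((10 : Int) ^ (digits.length - 1 - j)) tc pvConfusions = none) →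
    pvLoopA v tc digits pos = pvLoopA v tc digits tgt := by
  intro fuel
  induction fuel with
  | zero =>
    intro pos hf hle _
    have : pos = tgt := by omega
    rw [this]
  | succ fuel ih =>
    intro pos hf hle h
    by_cases he : pos = tgt
    · rw [he]
    · have hlt : pos < tgt := by omega
      by_cases hp : pos < digits.length
      · rw [pvLoopA, dif_pos hp]
        simp only [h pos (Nat.le_refl _) hlt hp]
        exact ih (pos + 1) (by omega) (by omega) (fun j hj hjt hjl => h j (by omega) hjt hjl)
      · -- tgt ≥ pos ≥ length: both loops are none
        rw [pvLoopA, dif_neg hp, pvLoopA, dif_neg (by omega)]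

-- ===== VERDICT (by name: the statement is the Claim_ definition above) =====
theorem find_digit_fix_py_spec : Claim_equal_find_digit_fix_py := by
  intro value target_change _
  unfold Spec_find_digit_fix_py find_digit_fix_py find_digit_fix_py_alt
  cases value with
  | none => rfl
  | some v =>
    by_cases htc : target_change = 0
    · simp [htc]
    · simp only [htc, if_false]
      set digits := (PySem.Int.toStr |v|).toList with hdig
      set n := digits.length with hn
      obtain ⟨hfac, hq10, hqne⟩ := pvVal10_spec target_change htc
      set q : Int := (pvVal10 target_change).1 with hq
      set vv : Nat := (pvVal10 target_change).2 with hvv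
      by_cases hguard : (n : Int) - 1 - (vv : Int) < 0 ∨ ¬(-9 ≤ q ∧ q ≤ 9)
      · -- B returns none; A's scan fails at every position
        rw [if_pos hguard]
        apply pvLoopA_none v target_change digits n 0 (by omega)
        intro j _ hj
        by_cases hk : n - 1 - j = vv
        · -- only possible when |q| ≤ 9 fails (the exponent guard forces hk false)
          rcases hguard with hg | hg
          · exfalso; omega
          · rw [hfac, hk]
            apply pvPairScan_eq_none _ _ _ (pow_ne_zero _ (by norm_num))
            rintro c ⟨hm, he⟩
            obtain ⟨h1, h2, h3⟩ := pvConfusions_diff _ hm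
            simp only at h1 h2 h3
            have : c - pvDigitVal digits[j] = q :=
              mul_right_cancel₀ (pow_ne_zero _ (by norm_num)) he
            exact hg (by omega)
        · rw [hfac]
          exact pvScanOff _ q vv _ hq10 hk
      · rw [if_neg hguard]
        rw [not_or, not_lt, not_not] at hguard
        obtain ⟨hvn, hq9⟩ := hguard
        have hvle : vv ≤ n - 1 := by omega
        have hn1 : 1 ≤ n := by omega
        set pos : Nat := n - 1 - vv with hpos
        have hplt : pos < n := by omega
        have hexp : n - 1 - pos = vv := by omega
        rw [dif_pos hplt]
        set d : Int := pvDigitVal digits[pos] with hd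
        -- bring A's loop to position pos
        rw [pvLoopA_skip v target_change digits pos pos 0 (by omega) (by omega)
          (fun j hj hjt hjl => by
            have hk : n - 1 - j ≠ vv := by omega
            rw [hfac]; exact pvScanOff _ q vv _ hq10 hk)]
        rw [pvLoopA, dif_pos hplt]
        rw [show digits.length - 1 - pos = vv from hexp, ← hd]
        dsimp only
        by_cases hmem : (d, d + q) ∈ pvConfusions
        · -- scan finds exactly (d, d+q)
          have hscan : pvPairScan d ((10 : Int) ^ vv) target_change pvConfusions = some (d + q) := by
            rw [pvPairScan_eq_some _ _ _ _ (pow_ne_zero _ (by norm_num))]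
            exact ⟨hmem, by rw [hfac]; ring⟩
          rw [hscan]
          have hmem' : (d, d + q) ∈ pvConfusionSet := by
            unfold pvConfusionSet
            exact (PySem.Set.mem_ofList pvConfusions (d, d + q)).mpr hmem
          rw [if_pos hmem']
          dsimp only
          have hset : digits.set pos (pvDigitChr (d + q))
              = digits.take pos ++ pvDigitChr (d + q) :: digits.drop (pos + 1) := by
            rw [List.set_eq_take_append_cons_drop, if_pos hplt]
          rw [hset]
        · -- no pair can match at pos either; both sides are none
          have hscan : pvPairScan d ((10 : Int) ^ vv) target_change pvConfusions = none := by
            apply pvPairScan_eq_none _ _ _ (pow_ne_zero _ (by norm_num))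
            rintro c ⟨hm, he⟩
            have : c - d = q := by
              apply mul_right_cancel₀ (pow_ne_zero vv (by norm_num : (10:Int) ≠ 0))
              rw [he, hfac]
            have hc : c = d + q := by omega
            exact hmem (hc ▸ hm)
          rw [hscan]
          have hmem' : ¬ (d, d + q) ∈ pvConfusionSet := by
            unfold pvConfusionSet
            rw [PySem.Set.mem_ofList pvConfusions (d, d + q)]
            exact hmem
          rw [if_neg hmem']
          dsimp only
          apply pvLoopA_none v target_change digits n (pos + 1) (by omega)
          intro j hj hjl
          have hk : n - 1 - j ≠ vv := by omega
          rw [hfac]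
          exact pvScanOff _ q vv _ hq10 hk
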